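-- pv_equiv track=rewrite | github.com/CogComp/Zero_Shot_Schema_Induction | SDF_json.py | construct_longest_time_chains
-- ===== SOURCE A (Python) =====
-- from collections import defaultdict
--
-- def DFS(G, v, seen=None, path=None):
--     if seen is None: seen = []
--     if path is None: path = [v]
--
--     seen.append(v)
--
--     paths = []
--     for t in G[v]:
--         if t not in seen:
--             t_path = path + [t]
--             paths.append(tuple(t_path))
--             paths.extend(DFS(G, t, seen[:], t_path))
--     return paths
--
-- def construct_longest_time_chains(temporal_rel):
--     G = defaultdict(list)
--     sources = []
--     targets = []
--     for (s, t) in temporal_rel: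
--         G[s].append(t)
--         sources.append(s)
--         targets.append(t)
--
--     real_sources = [x for x in sources if not x in targets]
--     max_paths = []
--     for v in real_sources:
--         all_paths = DFS(G, v)
--         max_len = max(len(p) for p in all_paths)
--         max_paths_v = [p for p in all_paths if len(p) == max_len]
--         max_paths.extend(max_paths_v)
--     return max_paths
-- ===== SOURCE B (Python) =====
-- def construct_longest_time_chains(temporal_rel):
--     # breadth-first by levels: the k-th frontier holds every simple path of
--     # length k+1 from the root, in the same relative order as A's DFS pre-order,
--     # so the last nonempty frontier IS the list of longest paths -- no max/filter.
--     G = {}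
--     sources = []
--     targets = []
--     for (s, t) in temporal_rel:
--         G.setdefault(s, []).append(t)
--         sources.append(s)
--         targets.append(t)
--     max_paths = []
--     for v in sources:
--         if v in targets:
--             continue
--         frontier = [(v,)]
--         while True:
--             nxt = [p + (t,) for p in frontier for t in G.get(p[-1], []) if t not in p]
--             if not nxt:
--                 break
--             frontier = nxt
--         max_paths.extend(frontier)
--     return max_paths
-- ===== Notes on version B (the rewrite author's own statement) =====
-- stated objective: simpler
-- what changed: B replaces A's recursive DFS enumeration plus max-of-lengths plus filter-by-length with a breadth-first level iteration: the k-th frontier holds all simple paths of length k+1 in A's relative order, so the last nonempty frontier is exactly the list of longest paths and the max/filter passes disappear.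
import Mathlib
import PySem

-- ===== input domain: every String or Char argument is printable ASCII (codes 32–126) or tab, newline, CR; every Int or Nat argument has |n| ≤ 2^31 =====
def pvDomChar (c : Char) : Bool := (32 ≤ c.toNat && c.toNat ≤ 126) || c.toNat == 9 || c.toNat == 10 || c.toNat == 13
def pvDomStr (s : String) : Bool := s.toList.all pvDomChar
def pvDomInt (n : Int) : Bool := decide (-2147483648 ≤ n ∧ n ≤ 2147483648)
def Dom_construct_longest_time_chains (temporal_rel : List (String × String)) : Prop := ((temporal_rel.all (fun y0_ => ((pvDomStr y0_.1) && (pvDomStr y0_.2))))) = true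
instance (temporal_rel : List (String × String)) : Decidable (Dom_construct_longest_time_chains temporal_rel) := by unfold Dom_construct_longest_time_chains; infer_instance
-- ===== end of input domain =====

-- B replaces A's recursive DFS + max-of-lengths + filter with a breadth-first level
-- iteration whose last nonempty frontier is exactly the list of longest paths.

-- ===== PORT A =====
-- A's recursive DFS (the paths.append / paths.extend loop).  The fuel argument is only a
-- totality guard: this recursion's depth is at most (number of targets) + 1, so the call
-- site passes temporal_rel.length + 1, which never runs out.
mutual
def dfsA (fuel : Nat) (G : PySem.Dict String (List String)) (v : String)
    (seen path : List String) : List (List String) :=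
  match fuel with
  | 0 => []
  | f + 1 =>
    let seen := seen ++ [v]          -- seen.append(v)
    dfsLoopA f G seen path (G.getD v [])
termination_by (fuel, 0)
def dfsLoopA (fuel : Nat) (G : PySem.Dict String (List String))
    (seen path : List String) (nbrs : List String) : List (List String) :=
  match nbrs with
  | [] => []
  | t :: rest =>
    if t ∈ seen then dfsLoopA fuel G seen path rest
    else
      let t_path := path ++ [t]
      t_path :: (dfsA fuel G t seen t_path ++ dfsLoopA fuel G seen path rest)
termination_by (fuel, nbrs.length + 1)
end

def construct_longest_time_chains (temporal_rel : List (String × String)) : List (List String) :=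
  let acc := temporal_rel.foldl
    (fun (acc : PySem.Dict String (List String) × List String × List String) st =>
      (acc.1.insert st.1 ((acc.1.getD st.1 []) ++ [st.2]),   -- G[s].append(t)
       acc.2.1 ++ [st.1], acc.2.2 ++ [st.2]))
    (PySem.Dict.empty, [], [])
  let G := acc.1
  let sources := acc.2.1
  let targets := acc.2.2
  let real_sources := sources.filter (fun x => !(targets.contains x))
  real_sources.foldl
    (fun max_paths v =>
      let all_paths := dfsA (temporal_rel.length + 1) G v [] [v]
      -- max(len(p) for p in all_paths); the .getD 0 default is unreachable (all_paths ≠ [])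
      let max_len := ((all_paths.map List.length).max?).getD 0
      max_paths ++ all_paths.filter (fun p => p.length == max_len))
    []

-- ===== PORT B =====
-- one BFS level: [p + (t,) for p in frontier for t in G.get(p[-1], []) if t not in p]
-- (p[-1] via pyGet?; frontier paths are nonempty, so the .getD "" default is unreachable)
def levelStep (G : PySem.Dict String (List String)) (frontier : List (List String)) :
    List (List String) :=
  frontier.flatMap (fun p =>
    ((G.getD ((PySem.List.pyGet? p (-1)).getD "") []).filter (fun t => !(p.contains t))).map
      (fun t => p ++ [t]))

-- the while-True loop; the fuel is only a totality guard: frontier paths are simple, so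
-- at most (number of edges) iterations produce a nonempty next level
def levelLoop (G : PySem.Dict String (List String)) :
    Nat → List (List String) → List (List String)
  | 0, frontier => frontier
  | f + 1, frontier =>
    let nxt := levelStep G frontier
    if nxt = [] then frontier else levelLoop G f nxt

def construct_longest_time_chains_alt (temporal_rel : List (String × String)) : List (List String) :=
  let acc := temporal_rel.foldl
    (fun (acc : PySem.Dict String (List String) × List String × List String) st =>
      (acc.1.insert st.1 ((acc.1.getD st.1 []) ++ [st.2]),   -- G.setdefault(s, []).append(t)
       acc.2.1 ++ [st.1], acc.2.2 ++ [st.2]))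
    (PySem.Dict.empty, [], [])
  let G := acc.1
  let sources := acc.2.1
  let targets := acc.2.2
  sources.foldl
    (fun max_paths v =>
      if targets.contains v then max_paths
      else max_paths ++ levelLoop G (temporal_rel.length + 1) [[v]])
    []

-- ===== PRECONDITION & SPEC =====
def Spec_construct_longest_time_chains (temporal_rel : List (String × String)) (out : List (List String)) : Prop := out = construct_longest_time_chains_alt temporal_rel
instance (temporal_rel : List (String × String)) (out : List (List String)) : Decidable (Spec_construct_longest_time_chains temporal_rel out) := by unfold Spec_construct_longest_time_chains; infer_instance

-- ===== CLAIM (what is proved, stated in full; the proofs are below) =====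
def Claim_equal_construct_longest_time_chains : Prop := ∀ (temporal_rel : List (String × String)), Dom_construct_longest_time_chains temporal_rel → Spec_construct_longest_time_chains temporal_rel (construct_longest_time_chains temporal_rel)

-- ===== LEMMAS AND PROOFS =====

-- proof-only helpers ------------------------------------------------------

def buildF (acc : PySem.Dict String (List String) × List String × List String)
    (st : String × String) : PySem.Dict String (List String) × List String × List String :=
  (acc.1.insert st.1 ((acc.1.getD st.1 []) ++ [st.2]), acc.2.1 ++ [st.1], acc.2.2 ++ [st.2])

def filterLen (n : Nat) (l : List (List String)) : List (List String) :=
  l.filter (fun p => p.length == n)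

def stepFrom (path : List String) (nbrs : List String) : List (List String) :=
  (nbrs.filter (fun t => !(path.contains t))).map (fun t => path ++ [t])

def iterStep (G : PySem.Dict String (List String)) : Nat → List (List String) → List (List String)
  | 0, fr => fr
  | k + 1, fr => iterStep G k (levelStep G fr)

-- basic facts about levelStep / iterStep ----------------------------------

theorem levelStep_append (G : PySem.Dict String (List String)) (l1 l2 : List (List String)) :
    levelStep G (l1 ++ l2) = levelStep G l1 ++ levelStep G l2 := by
  simp [levelStep]

theorem levelStep_nil (G : PySem.Dict String (List String)) : levelStep G [] = [] := rfl

theorem iterStep_nil (G : PySem.Dict String (List String)) : ∀ k, iterStep G k [] = [] := by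
  intro k
  induction k with
  | zero => rfl
  | succ k ih => simp [iterStep, levelStep_nil, ih]

theorem iterStep_append (G : PySem.Dict String (List String)) :
    ∀ (k : Nat) (l1 l2 : List (List String)),
      iterStep G k (l1 ++ l2) = iterStep G k l1 ++ iterStep G k l2 := by
  intro k
  induction k with
  | zero => intro l1 l2; rfl
  | succ k ih => intro l1 l2; simp [iterStep, levelStep_append, ih]

theorem iterStep_succ' (G : PySem.Dict String (List String)) :
    ∀ (k : Nat) (fr : List (List String)),
      iterStep G (k + 1) fr = levelStep G (iterStep G k fr) := by
  intro k
  induction k with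
  | zero => intro fr; rfl
  | succ k ih =>
    intro fr
    show iterStep G (k + 1) (levelStep G fr) = _
    rw [ih (levelStep G fr)]
    rfl

theorem iterStep_add (G : PySem.Dict String (List String)) :
    ∀ (k j : Nat) (fr : List (List String)),
      iterStep G (k + j) fr = iterStep G j (iterStep G k fr) := by
  intro k
  induction k with
  | zero => intro j fr; simp [iterStep]
  | succ k ih =>
    intro j fr
    have h : k + 1 + j = (k + j) + 1 := by omega
    rw [h]
    show iterStep G (k + j) (levelStep G fr) = _
    rw [ih j (levelStep G fr)]
    rfl

theorem levelStep_singleton (G : PySem.Dict String (List String)) (p : List String) :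
    levelStep G [p] = stepFrom p (G.getD ((PySem.List.pyGet? p (-1)).getD "") []) := by
  simp [levelStep, stepFrom]

theorem pyLast_append (p : List String) (t : String) :
    (PySem.List.pyGet? (p ++ [t]) (-1)).getD "" = t := by
  simp [PySem.List.pyGet?_neg_one]

theorem levelStep_snoc (G : PySem.Dict String (List String)) (p : List String) (t : String) :
    levelStep G [p ++ [t]] = stepFrom (p ++ [t]) (G.getD t []) := by
  rw [levelStep_singleton, pyLast_append]

-- every path dfsLoopA emits is strictly longer than the path of its frame ---

theorem dfsLoopA_len :
    ∀ (f : Nat) (G : PySem.Dict String (List String)) (seen path nbrs : List String)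
      (q : List String), q ∈ dfsLoopA f G seen path nbrs → path.length < q.length := by
  intro f
  induction f with
  | zero =>
    intro G seen path nbrs
    induction nbrs with
    | nil => intro q hq; simp [dfsLoopA] at hq
    | cons t rest ih =>
      intro q hq
      by_cases h : t ∈ seen
      · rw [dfsLoopA, if_pos h] at hq
        exact ih q hq
      · rw [dfsLoopA, if_neg h] at hq
        rcases List.mem_cons.1 hq with hq | hq
        · subst hq; simp
        · rcases List.mem_append.1 hq with hq | hq
          · simp [dfsA] at hq
          · exact ih q hq
  | succ f ihf =>
    intro G seen path nbrs
    induction nbrs with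
    | nil => intro q hq; simp [dfsLoopA] at hq
    | cons t rest ih =>
      intro q hq
      by_cases h : t ∈ seen
      · rw [dfsLoopA, if_pos h] at hq
        exact ih q hq
      · rw [dfsLoopA, if_neg h] at hq
        rcases List.mem_cons.1 hq with hq | hq
        · subst hq; simp
        · rcases List.mem_append.1 hq with hq | hq
          · have : (path ++ [t]).length < q.length := by
              have hq' : q ∈ dfsLoopA f G (seen ++ [t]) (path ++ [t]) (G.getD t []) := by
                simpa [dfsA] using hq
              exact ihf G (seen ++ [t]) (path ++ [t]) (G.getD t []) q hq'
            simp at this; omega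
          · exact ih q hq

-- the fixed-length slice of A's DFS emission stream is a BFS level ----------

theorem dfsA_len (fuel : Nat) (G : PySem.Dict String (List String)) (v : String)
    (seen path : List String) (q : List String) (hq : q ∈ dfsA fuel G v seen path) :
    path.length < q.length := by
  cases fuel with
  | zero => simp [dfsA] at hq
  | succ f =>
    rw [dfsA] at hq
    exact dfsLoopA_len f G (seen ++ [v]) path (G.getD v []) q hq

theorem filterLen_dfsA_short (fuel : Nat) (G : PySem.Dict String (List String)) (v : String)
    (seen path : List String) (n : Nat) (hn : n ≤ path.length) :
    filterLen n (dfsA fuel G v seen path) = [] := by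
  unfold filterLen
  rw [List.filter_eq_nil_iff]
  intro q hq
  have := dfsA_len fuel G v seen path q hq
  simp only [beq_iff_eq]
  omega

theorem dfsLoop_level :
    ∀ (f : Nat) (G : PySem.Dict String (List String)) (path nbrs : List String) (k : Nat),
      filterLen (path.length + (k + 1)) (dfsLoopA f G path path nbrs)
        = if k ≤ f then iterStep G k (stepFrom path nbrs) else [] := by
  intro f
  induction f with
  | zero =>
    intro G path nbrs
    induction nbrs with
    | nil =>
      intro k
      simp [dfsLoopA, filterLen, stepFrom, iterStep_nil]
    | cons t rest ih =>
      intro k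
      by_cases h : t ∈ path
      · rw [dfsLoopA, if_pos h, ih k]
        have hs : stepFrom path (t :: rest) = stepFrom path rest := by
          simp [stepFrom, h]
        rw [hs]
      · rw [dfsLoopA, if_neg h]
        have hc : path.contains t = false := by
          simp [h]
        cases k with
        | zero =>
          have hrest := ih 0
          simp only [Nat.le_refl, if_pos, iterStep] at hrest ⊢
          simp only [filterLen, List.filter_cons, List.filter_append] at hrest ⊢
          have h1 : ((path ++ [t]).length == path.length + (0 + 1)) = true := by simp
          rw [h1]
          have h2 : dfsA 0 G t path (path ++ [t]) = [] := by simp [dfsA]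
          rw [h2]
          simp only [List.filter_nil, List.nil_append]
          rw [hrest]
          simp [stepFrom, h]
        | succ k' =>
          have hrest := ih (k' + 1)
          rw [if_neg (by omega : ¬ k' + 1 ≤ 0)] at hrest
          simp only [filterLen, List.filter_cons, List.filter_append]
          have h1 : ((path ++ [t]).length == path.length + (k' + 1 + 1)) = false := by
            simp only [beq_eq_false_iff_ne, ne_eq, List.length_append, List.length_cons,
              List.length_nil]
            omega
          rw [h1]
          have h2 : dfsA 0 G t path (path ++ [t]) = [] := by simp [dfsA]
          rw [h2]
          simp only [List.filter_nil, List.nil_append]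
          simpa [filterLen] using hrest
  | succ f ihf =>
    intro G path nbrs
    induction nbrs with
    | nil =>
      intro k
      simp [dfsLoopA, filterLen, stepFrom, iterStep_nil]
    | cons t rest ih =>
      intro k
      by_cases h : t ∈ path
      · rw [dfsLoopA, if_pos h, ih k]
        have hs : stepFrom path (t :: rest) = stepFrom path rest := by
          simp [stepFrom, h]
        rw [hs]
      · rw [dfsLoopA, if_neg h]
        have hc : path.contains t = false := by
          simp [h]
        have hsf : stepFrom path (t :: rest) = [path ++ [t]] ++ stepFrom path rest := by
          simp [stepFrom, h]
        cases k with
        | zero =>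
          have hrest := ih 0
          simp only [Nat.zero_le, if_pos, iterStep] at hrest ⊢
          simp only [filterLen, List.filter_cons, List.filter_append] at hrest ⊢
          have h1 : ((path ++ [t]).length == path.length + (0 + 1)) = true := by simp
          rw [h1]
          have h2 := filterLen_dfsA_short (f + 1) G t path (path ++ [t])
            (path.length + (0 + 1)) (by simp)
          simp only [filterLen] at h2
          rw [h2]
          simp only [List.nil_append]
          rw [hrest, hsf]
          simp
        | succ k' =>
          simp only [filterLen, List.filter_cons, List.filter_append]
          have h1 : ((path ++ [t]).length == path.length + (k' + 1 + 1)) = false := by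
            simp only [beq_eq_false_iff_ne, ne_eq, List.length_append, List.length_cons,
              List.length_nil]
            omega
          rw [h1]
          -- the child frame: A's recursion one level deeper
          have hchild : dfsA (f + 1) G t path (path ++ [t])
              = dfsLoopA f G (path ++ [t]) (path ++ [t]) (G.getD t []) := by
            simp [dfsA]
          have hlevel := ihf G (path ++ [t]) (G.getD t []) k'
          have hlen : (path ++ [t]).length + (k' + 1) = path.length + (k' + 1 + 1) := by
            simp only [List.length_append, List.length_cons, List.length_nil]
            omega
          rw [hlen] at hlevel
          have hstep : stepFrom (path ++ [t]) (G.getD t []) = levelStep G [path ++ [t]] :=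
            (levelStep_snoc G path t).symm
          rw [hstep] at hlevel
          have hiter : iterStep G k' (levelStep G [path ++ [t]])
              = iterStep G (k' + 1) [path ++ [t]] := rfl
          rw [hiter] at hlevel
          have hrest := ih (k' + 1)
          simp only [filterLen] at hlevel hrest
          rw [hchild, hlevel, hrest, hsf, iterStep_append]
          by_cases hk : k' ≤ f
          · rw [if_pos hk, if_pos (by omega : k' + 1 ≤ f + 1), if_pos (by omega : k' + 1 ≤ f + 1)]
            simp
          · rw [if_neg hk, if_neg (by omega : ¬ k' + 1 ≤ f + 1), if_neg (by omega : ¬ k' + 1 ≤ f + 1)]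
            simp



-- the graph-building fold: sources, targets and adjacency lists -----------

theorem build_fst : ∀ (rel : List (String × String))
    (d : PySem.Dict String (List String)) (l1 l2 : List String),
    (List.foldl buildF (d, l1, l2) rel).2.1 = l1 ++ rel.map Prod.fst := by
  intro rel
  induction rel with
  | nil => intro d l1 l2; simp
  | cons e rest ih =>
    intro d l1 l2
    rw [List.foldl_cons]
    show (List.foldl buildF (buildF (d, l1, l2) e) rest).2.1 = _
    rw [ih]
    simp [buildF]

theorem build_snd : ∀ (rel : List (String × String))
    (d : PySem.Dict String (List String)) (l1 l2 : List String),
    (List.foldl buildF (d, l1, l2) rel).2.2 = l2 ++ rel.map Prod.snd := by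
  intro rel
  induction rel with
  | nil => intro d l1 l2; simp
  | cons e rest ih =>
    intro d l1 l2
    rw [List.foldl_cons]
    show (List.foldl buildF (buildF (d, l1, l2) e) rest).2.2 = _
    rw [ih]
    simp [buildF]

theorem build_G : ∀ (rel : List (String × String))
    (d : PySem.Dict String (List String)) (l1 l2 : List String) (s : String),
    (List.foldl buildF (d, l1, l2) rel).1.getD s []
      = d.getD s [] ++ (rel.filter (fun e => e.1 == s)).map Prod.snd := by
  intro rel
  induction rel with
  | nil => intro d l1 l2 s; simp
  | cons e rest ih =>
    intro d l1 l2 s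
    rw [List.foldl_cons]
    show (List.foldl buildF (buildF (d, l1, l2) e) rest).1.getD s [] = _
    have hb : buildF (d, l1, l2) e
        = (d.insert e.1 (d.getD e.1 [] ++ [e.2]), l1 ++ [e.1], l2 ++ [e.2]) := rfl
    rw [hb, ih]
    rw [PySem.Dict.getD_insert]
    by_cases hse : s = e.1
    · rw [if_pos hse, List.filter_cons, if_pos (by simp [hse])]
      simp [hse]
    · rw [if_neg hse, List.filter_cons, if_neg (by simp; exact fun hc => hse hc.symm)]

theorem mem_build_G (rel : List (String × String)) (s t : String) :
    t ∈ (List.foldl buildF (PySem.Dict.empty, [], []) rel).1.getD s [] ↔ (s, t) ∈ rel := by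
  rw [build_G]
  simp only [PySem.Dict.getD_empty, List.nil_append, List.mem_map, List.mem_filter]
  constructor
  · rintro ⟨e, ⟨he, hs⟩, ht⟩
    have : e = (s, t) := by
      cases e
      simp only [beq_iff_eq] at hs
      simp_all
    rwa [this] at he
  · intro h
    exact ⟨(s, t), ⟨h, by simp⟩, rfl⟩

-- invariant of the BFS frontier: simple paths over {v} ∪ tgs ----------------

theorem iter_inv (G : PySem.Dict String (List String)) (tgs : List String) (v : String)
    (hGval : ∀ s x, x ∈ G.getD s [] → x ∈ tgs) :
    ∀ (k : Nat) (q : List String), q ∈ iterStep G k [[v]] →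
      q.length = k + 1 ∧ q.Nodup ∧ ∀ x ∈ q, x = v ∨ x ∈ tgs := by
  intro k
  induction k with
  | zero =>
    intro q hq
    simp [iterStep] at hq
    subst hq
    simp
  | succ k ih =>
    intro q hq
    rw [iterStep_succ'] at hq
    simp only [levelStep, List.mem_flatMap, List.mem_map, List.mem_filter] at hq
    rcases hq with ⟨p, hp, t, ⟨htG, htp⟩, rfl⟩
    obtain ⟨hlen, hnd, hmem⟩ := ih p hp
    refine ⟨by simp [hlen], ?_, ?_⟩
    · have htnp : t ∉ p := by
        intro hmem'
        simp [hmem'] at htp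
      rw [List.nodup_append]
      refine ⟨hnd, List.nodup_singleton t, ?_⟩
      intro a ha b hb
      have hbt : b = t := by simpa using hb
      subst hbt
      intro hab
      exact htnp (hab ▸ ha)
    · intro x hx
      rcases List.mem_append.1 hx with hx | hx
      · exact hmem x hx
      · right
        have : x = t := by simpa using hx
        subst this
        exact hGval _ _ htG

theorem iter_big_empty (G : PySem.Dict String (List String)) (tgs : List String) (v : String)
    (hGval : ∀ s x, x ∈ G.getD s [] → x ∈ tgs) (m : Nat) (hm : tgs.length ≤ m) :
    ∀ j, m + 1 ≤ j → iterStep G j [[v]] = [] := by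
  have hbase : iterStep G (tgs.length + 1) [[v]] = [] := by
    by_contra hne
    obtain ⟨q, hq⟩ := List.exists_mem_of_ne_nil _ hne
    obtain ⟨hlen, hnd, hmem⟩ := iter_inv G tgs v hGval (tgs.length + 1) q hq
    have hsub : q ⊆ v :: tgs := by
      intro x hx
      rcases hmem x hx with h | h
      · simp [h]
      · exact List.mem_cons_of_mem _ h
    have : q.length ≤ (v :: tgs).length :=
      calc q.length = q.toFinset.card := (List.toFinset_card_of_nodup hnd).symm
        _ ≤ (v :: tgs).toFinset.card := Finset.card_le_card (by
              intro x hx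
              simp only [List.mem_toFinset] at *
              exact hsub hx)
        _ ≤ (v :: tgs).length := List.toFinset_card_le _
    simp at this
    omega
  intro j hj
  have h1 : tgs.length + 1 ≤ j := by omega
  have : j = (tgs.length + 1) + (j - (tgs.length + 1)) := by omega
  rw [this, iterStep_add, hbase, iterStep_nil]

-- per root: A's collect-all-paths / max / filter equals B's last nonempty frontier

theorem per_root (G : PySem.Dict String (List String)) (tgs : List String) (v : String)
    (m : Nat) (hGval : ∀ s x, x ∈ G.getD s [] → x ∈ tgs) (htgs : tgs.length ≤ m)
    (hm : 1 ≤ m) (hne : ∃ t, t ∈ G.getD v [] ∧ t ≠ v) :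
    (dfsA (m + 1) G v [] [v]).filter
        (fun p => p.length == (((dfsA (m + 1) G v [] [v]).map List.length).max?).getD 0)
      = levelLoop G (m + 1) [[v]] := by
  have hall : dfsA (m + 1) G v [] [v] = dfsLoopA m G [v] [v] (G.getD v []) := by
    simp [dfsA]
  have hlast : (PySem.List.pyGet? [v] (-1)).getD "" = v := by
    simp [PySem.List.pyGet?_neg_one]
  have hlv1 : levelStep G [[v]] = stepFrom [v] (G.getD v []) := by
    rw [levelStep_singleton, hlast]
  have hlvl : ∀ k, filterLen (k + 2) (dfsA (m + 1) G v [] [v])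
      = if k ≤ m then iterStep G (k + 1) [[v]] else [] := by
    intro k
    rw [hall]
    have h := dfsLoop_level m G [v] (G.getD v []) k
    have harith : [v].length + (k + 1) = k + 2 := by simp; omega
    rw [harith, ← hlv1] at h
    exact h
  have h1ne : iterStep G 1 [[v]] ≠ [] := by
    obtain ⟨t, htG, htv⟩ := hne
    have hmem : ([v] ++ [t]) ∈ iterStep G 1 [[v]] := by
      show _ ∈ iterStep G 0 (levelStep G [[v]])
      rw [iterStep, hlv1]
      simp only [stepFrom, List.mem_map, List.mem_filter]
      exact ⟨t, ⟨htG, by simp [htv]⟩, rfl⟩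
    exact List.ne_nil_of_mem hmem
  set M := Nat.findGreatest (fun k => iterStep G k [[v]] ≠ []) m with hMdef
  have hM1 : 1 ≤ M := Nat.le_findGreatest hm h1ne
  have hMne : iterStep G M [[v]] ≠ [] :=
    Nat.findGreatest_spec (P := fun k => iterStep G k [[v]] ≠ []) hm h1ne
  have hMle : M ≤ m := Nat.findGreatest_le m
  have hEmpty : ∀ j, M < j → iterStep G j [[v]] = [] := by
    intro j hj
    by_cases hjm : j ≤ m
    · by_contra hne'
      exact Nat.findGreatest_is_greatest hj hjm hne'
    · exact iter_big_empty G tgs v hGval m htgs j (by omega)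
  have hmemlen : ∀ q ∈ dfsA (m + 1) G v [] [v], 2 ≤ q.length ∧ q.length ≤ M + 1 := by
    intro q hq
    have h2 : (1 : Nat) < q.length := by
      have := dfsA_len (m + 1) G v [] [v] q hq
      simpa using this
    refine ⟨by omega, ?_⟩
    have hmemf : q ∈ filterLen q.length (dfsA (m + 1) G v [] [v]) := by
      simp [filterLen, hq]
    have hql : q.length = (q.length - 2) + 2 := by omega
    rw [hql, hlvl (q.length - 2)] at hmemf
    by_cases hjm : q.length - 2 ≤ m
    · rw [if_pos hjm] at hmemf
      have hne' : iterStep G (q.length - 2 + 1) [[v]] ≠ [] := List.ne_nil_of_mem hmemf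
      have : ¬ M < q.length - 2 + 1 := fun hlt => hne' (hEmpty _ hlt)
      omega
    · rw [if_neg hjm] at hmemf
      simp at hmemf
  obtain ⟨qM, hqM⟩ := List.exists_mem_of_ne_nil _ hMne
  have hMfl : filterLen (M + 1) (dfsA (m + 1) G v [] [v]) = iterStep G M [[v]] := by
    have h := hlvl (M - 1)
    have e1 : M - 1 + 2 = M + 1 := by omega
    have e2 : M - 1 + 1 = M := by omega
    rw [e1, e2] at h
    rw [h, if_pos (by omega : M - 1 ≤ m)]
  have hqM_len : qM.length = M + 1 := (iter_inv G tgs v hGval M qM hqM).1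
  have hqM_mem : qM ∈ dfsA (m + 1) G v [] [v] := by
    have hmemf : qM ∈ filterLen (M + 1) (dfsA (m + 1) G v [] [v]) := hMfl ▸ hqM
    exact List.mem_of_mem_filter hmemf
  have hmax : ((dfsA (m + 1) G v [] [v]).map List.length).max? = some (M + 1) := by
    rw [List.max?_eq_some_iff]
    constructor
    · exact List.mem_map.2 ⟨qM, hqM_mem, hqM_len⟩
    · intro b hb
      obtain ⟨q, hq, rfl⟩ := List.mem_map.1 hb
      exact (hmemlen q hq).2
  rw [hmax]
  simp only [Option.getD_some]
  have hloop : ∀ f j, j ≤ M → M + 1 - j ≤ f →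
      levelLoop G f (iterStep G j [[v]]) = iterStep G M [[v]] := by
    intro f
    induction f with
    | zero => intro j hj hf; omega
    | succ f ihf =>
      intro j hj hf
      show (let nxt := levelStep G (iterStep G j [[v]]);
            if nxt = [] then iterStep G j [[v]] else levelLoop G f nxt) = _
      rw [← iterStep_succ']
      by_cases hemp : iterStep G (j + 1) [[v]] = []
      · rw [if_pos hemp]
        have hjM : ¬ j < M := by
          intro hlt
          apply hMne
          have e : M = (j + 1) + (M - (j + 1)) := by omega
          rw [e, iterStep_add, hemp, iterStep_nil]
        have : j = M := by omega
        rw [this]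
      · rw [if_neg hemp]
        have hj1 : j + 1 ≤ M := by
          by_contra hgt
          exact hemp (hEmpty (j + 1) (by omega))
        exact ihf (j + 1) hj1 (by omega)
  have hB : levelLoop G (m + 1) [[v]] = iterStep G M [[v]] :=
    hloop (m + 1) 0 (by omega) (by omega)
  rw [hB, ← hMfl]
  rfl

-- the two top-level loops (A: filter real_sources then extend; B: guard inline)

theorem fold_guard (tg : List String) (F Bf : String → List (List String)) :
    ∀ (src : List String) (acc : List (List String)),
      (∀ w ∈ src, tg.contains w = false → F w = Bf w) →
      (src.filter (fun x => !(tg.contains x))).foldl (fun a v => a ++ F v) acc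
        = src.foldl (fun a v => if tg.contains v then a else a ++ Bf v) acc := by
  intro src
  induction src with
  | nil => intro acc h; rfl
  | cons w rest ih =>
    intro acc h
    cases hwc : tg.contains w with
    | true =>
      rw [List.filter_cons, if_neg (by rw [hwc]; simp), List.foldl_cons, if_pos hwc]
      exact ih acc (fun x hx => h x (List.mem_cons_of_mem _ hx))
    | false =>
      rw [List.filter_cons, if_pos (by rw [hwc]; simp), List.foldl_cons, List.foldl_cons,
        if_neg (by rw [hwc]; simp), h w (by simp : w ∈ w :: rest) hwc]
      exact ih _ (fun x hx => h x (List.mem_cons_of_mem _ hx))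

-- ===== VERDICT (by name: the statement is the Claim_ definition above) =====
theorem construct_longest_time_chains_spec : Claim_equal_construct_longest_time_chains := by
  intro rel _
  show construct_longest_time_chains rel = construct_longest_time_chains_alt rel
  unfold construct_longest_time_chains construct_longest_time_chains_alt
  show ((List.foldl buildF (PySem.Dict.empty, [], []) rel).2.1.filter
        (fun x => !((List.foldl buildF (PySem.Dict.empty, [], []) rel).2.2.contains x))).foldl
      (fun max_paths v => max_paths ++
        (dfsA (rel.length + 1) (List.foldl buildF (PySem.Dict.empty, [], []) rel).1 v [] [v]).filter
          (fun p => p.length ==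
            (((dfsA (rel.length + 1) (List.foldl buildF (PySem.Dict.empty, [], []) rel).1 v [] [v]).map
                List.length).max?).getD 0)) []
    = (List.foldl buildF (PySem.Dict.empty, [], []) rel).2.1.foldl
      (fun max_paths v =>
        if (List.foldl buildF (PySem.Dict.empty, [], []) rel).2.2.contains v then max_paths
        else max_paths ++
          levelLoop (List.foldl buildF (PySem.Dict.empty, [], []) rel).1 (rel.length + 1) [[v]]) []
  rw [build_fst, build_snd]
  simp only [List.nil_append]
  refine fold_guard (rel.map Prod.snd)
    (fun v => (dfsA (rel.length + 1) (List.foldl buildF (PySem.Dict.empty, [], []) rel).1 v [] [v]).filter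
      (fun p => p.length ==
        (((dfsA (rel.length + 1) (List.foldl buildF (PySem.Dict.empty, [], []) rel).1 v [] [v]).map
            List.length).max?).getD 0))
    (fun v => levelLoop (List.foldl buildF (PySem.Dict.empty, [], []) rel).1 (rel.length + 1) [[v]])
    (rel.map Prod.fst) [] ?_
  intro w hw hcon
  obtain ⟨e, hmem, heq⟩ := List.mem_map.1 hw
  have hvt : w ∉ rel.map Prod.snd := by simpa using hcon
  have hrelne : 1 ≤ rel.length := by
    have : rel ≠ [] := by rintro rfl; exact absurd hmem (List.not_mem_nil)
    cases rel with
    | nil => simp at this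
    | cons a l => simp
  refine per_root _ (rel.map Prod.snd) w rel.length ?_ (by simp) hrelne ?_
  · intro s x hx
    rw [mem_build_G] at hx
    exact List.mem_map.2 ⟨(s, x), hx, rfl⟩
  · refine ⟨e.2, ?_, ?_⟩
    · rw [mem_build_G]
      have : (w, e.2) = e := by cases e; simp_all
      rw [this]
      exact hmem
    · intro ht
      apply hvt
      rw [← ht]
      exact List.mem_map.2 ⟨e, hmem, rfl⟩
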